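-- pv_equiv track=rewrite | github.com/ashtonc/advent-of-code | 2023/13/13.py | findReflectionRow
-- ===== SOURCE A (Python) =====
-- def findReflectionRow(group, vertical=False, ignore=(0,0,"V")):
--     for i in range(len(group)-1):
--         c = i
--         m = True
--         for a in range(i, -1, -1):
--             c += 1
--             if c >= len(group):
--                 break
--             if group[a] != group[c]:
--                 m = False
--                 break
--         if m:
--             r = (len(group)-i-1, len(group)-i, "V") if vertical else (i+1, i+2, "H")
--             if r != ignore:
--                 return r
--     if not vertical:
--         return findReflectionRow(list(''.join(list(x)) for x in zip(*group))[::-1], vertical=True, ignore=ignore)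
-- ===== SOURCE B (Python) =====
-- def findReflectionRow(group, vertical=False, ignore=(0,0,"V")):
--     n = len(group)
--     # boundary between index i and i+1 mirrors iff rows match pairwise out to the edge
--     for i in range(n-1):
--         if all(group[i-k] == group[i+1+k] for k in range(min(i+1, n-i-1))):
--             r = (n-i-1, n-i, "V") if vertical else (i+1, i+2, "H")
--             if r != ignore:
--                 return r
--     if vertical:
--         return None
--     # vertical mirrors, scanned directly on the columns (rightmost boundary first) by
--     # comparing per-row slices, instead of transposing-and-reversing the grid and recursing
--     w = min((len(row) for row in group), default=0)
--     for j in range(w-2, -1, -1):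
--         m = min(j+1, w-j-1)
--         if all(row[j+1-m:j+1][::-1] == row[j+1:j+1+m] for row in group):
--             r = (j+1, j+2, "V")
--             if r != ignore:
--                 return r
--     return None
-- ===== Notes on version B (the rewrite author's own statement) =====
-- stated objective: alternative
-- what changed: B checks each mirror boundary by comparing the reversed prefix against the suffix (zip) instead of A's two-pointer walk with break flags, and finds vertical mirrors by scanning column boundaries right-to-left directly on the original grid, eliminating A's build-the-transpose-then-reverse-then-recurse step.
import Mathlib
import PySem

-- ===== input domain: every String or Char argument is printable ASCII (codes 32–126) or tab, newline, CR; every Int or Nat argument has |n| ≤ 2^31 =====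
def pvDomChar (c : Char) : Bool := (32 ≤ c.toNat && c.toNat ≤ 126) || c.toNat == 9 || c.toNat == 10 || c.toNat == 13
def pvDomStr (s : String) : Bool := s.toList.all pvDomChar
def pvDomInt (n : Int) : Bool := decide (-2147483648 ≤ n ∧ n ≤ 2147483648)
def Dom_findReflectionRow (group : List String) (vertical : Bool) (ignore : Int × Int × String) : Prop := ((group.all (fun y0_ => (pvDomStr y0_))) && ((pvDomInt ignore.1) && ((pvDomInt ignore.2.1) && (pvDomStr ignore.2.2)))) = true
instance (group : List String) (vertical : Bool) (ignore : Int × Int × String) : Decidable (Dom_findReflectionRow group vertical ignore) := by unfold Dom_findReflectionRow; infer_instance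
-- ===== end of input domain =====

-- B replaces A's two-pointer mirror walk by a reversed-prefix/suffix comparison and finds
-- vertical mirrors by scanning column boundaries right-to-left on the original grid instead
-- of transposing+reversing+recursing (objective: alternative decomposition, same cost).

-- ===== PORT A =====

-- width used by zip(*group): the shortest row (0 for an empty grid)
def pvMinW (group : List String) : Nat := ((group.map (fun s => s.toList.length)).min?).getD 0

-- the column string built by ''.join(x) for x in zip(*group); index q < pvMinW is in range
-- for every row, so the getD default is never used
def pvColStr (group : List String) (q : Nat) : String :=
  String.ofList (group.map (fun row => row.toList.getD q ' '))

-- hand port of list(''.join(list(x)) for x in zip(*group))[::-1] (exact: zip truncates to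
-- the shortest row)
def pvTransp (group : List String) : List String :=
  ((List.range (pvMinW group)).map (fun p => pvColStr group p)).reverse

-- inner loop: for a in range(i,-1,-1): c += 1; breaks; state (a, c) before the increment;
-- indices reached are always in range, so getD's default is never used
def pvInnerA (xs : List String) : Nat → Nat → Bool
  | a, c =>
    if xs.length ≤ c + 1 then true
    else if xs.getD a "" ≠ xs.getD (c+1) "" then false
    else match a with
      | 0 => true
      | a'+1 => pvInnerA xs a' (c+1)

-- outer loop over i in range(len(group)-1), with the early returns
def pvOuterA (xs : List String) (vertical : Bool) (ignore : Int × Int × String) :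
    List Nat → Option (Int × Int × String)
  | [] => none
  | i :: rest =>
    if pvInnerA xs i i then
      let r : Int × Int × String :=
        if vertical then ((xs.length : Int) - i - 1, (xs.length : Int) - i, "V")
        else ((i : Int) + 1, (i : Int) + 2, "H")
      if r ≠ ignore then some r else pvOuterA xs vertical ignore rest
    else pvOuterA xs vertical ignore rest

def findReflectionRow (group : List String) (vertical : Bool) (ignore : Int × Int × String) :
    Option (Int × Int × String) :=
  match pvOuterA group vertical ignore (List.range (group.length - 1)) with
  | some r => some r
  | none =>
    if vertical then none
    else findReflectionRow (pvTransp group) true ignore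
termination_by (if vertical then 0 else 1)
decreasing_by simp [*]

-- ===== PORT B =====

-- all(group[i-k] == group[i+1+k] for k in range(min(i+1, n-i-1))); the indices reached
-- are always in range, so the getD default is never used
def pvRowChk (group : List String) (i : Nat) : Bool :=
  (List.range (min (i+1) (group.length - (i+1)))).all
    (fun k => group.getD (i-k) "" == group.getD (i+1+k) "")

-- B's first loop over i in range(n-1)
def pvRowScan (group : List String) (vertical : Bool) (ignore : Int × Int × String) :
    List Nat → Option (Int × Int × String)
  | [] => none
  | i :: rest =>
    if pvRowChk group i then
      let r : Int × Int × String :=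
        if vertical then ((group.length : Int) - i - 1, (group.length : Int) - i, "V")
        else ((i : Int) + 1, (i : Int) + 2, "H")
      if r ≠ ignore then some r else pvRowScan group vertical ignore rest
    else pvRowScan group vertical ignore rest

-- m = min(j+1, w-j-1); all(row[j+1-m:j+1][::-1] == row[j+1:j+1+m] for row in group);
-- string slices are modelled as take/drop on the character list (exact: 0 ≤ a ≤ b bounds)
def pvColChk (group : List String) (w j : Nat) : Bool :=
  let m := min (j+1) (w - j - 1)
  group.all (fun row =>
    ((row.toList.take (j+1)).drop (j+1-m)).reverse == (row.toList.drop (j+1)).take m)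

-- B's second loop over j in range(w-2, -1, -1), i.e. the index list [w-2, ..., 0]
def pvColScan (group : List String) (w : Nat) (ignore : Int × Int × String) :
    List Nat → Option (Int × Int × String)
  | [] => none
  | j :: rest =>
    if pvColChk group w j then
      let r : Int × Int × String := ((j : Int) + 1, (j : Int) + 2, "V")
      if r ≠ ignore then some r else pvColScan group w ignore rest
    else pvColScan group w ignore rest

def findReflectionRow_alt (group : List String) (vertical : Bool) (ignore : Int × Int × String) :
    Option (Int × Int × String) :=
  match pvRowScan group vertical ignore (List.range (group.length - 1)) with
  | some r => some r
  | none =>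
    if vertical then none
    else pvColScan group (pvMinW group) ignore ((List.range (pvMinW group - 1)).reverse)

-- ===== PRECONDITION & SPEC =====
def Spec_findReflectionRow (group : List String) (vertical : Bool) (ignore : Int × Int × String) (out : Option (Int × Int × String)) : Prop := out = findReflectionRow_alt group vertical ignore
instance (group : List String) (vertical : Bool) (ignore : Int × Int × String) (out : Option (Int × Int × String)) : Decidable (Spec_findReflectionRow group vertical ignore out) := by unfold Spec_findReflectionRow; infer_instance

-- ===== CLAIM (what is proved, stated in full; the proofs are below) =====
def Claim_equal_findReflectionRow : Prop := ∀ (group : List String) (vertical : Bool) (ignore : Int × Int × String), Dom_findReflectionRow group vertical ignore → Spec_findReflectionRow group vertical ignore (findReflectionRow group vertical ignore)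

-- ===== LEMMAS AND PROOFS =====

-- the mirror predicate both checks compute
def pvMir (xs : List String) (i : Nat) : Prop :=
  ∀ k, i+1+k < xs.length → k ≤ i → xs.getD (i-k) "" = xs.getD (i+1+k) ""

theorem pvInnerA_iff (xs : List String) (a c : Nat) :
    pvInnerA xs a c = true ↔
      (∀ k, c+1+k < xs.length → k ≤ a → xs.getD (a-k) "" = xs.getD (c+1+k) "") := by
  induction a generalizing c with
  | zero =>
    rw [pvInnerA]
    split_ifs with h1 h2
    · simp only [true_iff]
      intro k hk _
      omega
    · simp only [false_iff, not_forall]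
      exact ⟨0, by omega, Nat.le_refl 0, h2⟩
    · rw [not_not] at h2
      simp only [true_iff]
      intro k hk hk0
      have : k = 0 := Nat.le_zero.mp hk0
      subst this
      exact h2
  | succ a' ih =>
    rw [pvInnerA]
    split_ifs with h1 h2
    · simp only [true_iff]
      intro k hk _
      omega
    · simp only [false_iff, not_forall]
      exact ⟨0, by omega, by omega, h2⟩
    · rw [not_not] at h2
      show pvInnerA xs a' (c+1) = true ↔ _
      rw [ih (c+1)]
      constructor
      · intro H k hk hk1
        cases k with
        | zero => exact h2
        | succ k' =>
          have e1 : a' + 1 - (k'+1) = a' - k' := by omega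
          have e2 : c + 1 + (k'+1) = c + 2 + k' := by omega
          rw [e1, e2]
          exact H k' (by omega) (by omega)
      · intro H k hk hk1
        have e1 : a' - k = a' + 1 - (k+1) := by omega
        have e2 : c + 1 + 1 + k = c + 1 + (k+1) := by omega
        rw [e1, e2]
        exact H (k+1) (by omega) (by omega)

theorem pvRowChk_iff (xs : List String) (i : Nat) :
    pvRowChk xs i = true ↔ pvMir xs i := by
  unfold pvRowChk pvMir
  simp only [List.all_eq_true, List.mem_range, beq_iff_eq]
  constructor
  · intro H k hk hki
    exact H k (by omega)
  · intro H k hk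
    exact H k (by omega) (by omega)

theorem pvInnerA_eq_rowChk (xs : List String) (i : Nat) :
    pvInnerA xs i i = pvRowChk xs i := by
  rw [Bool.eq_iff_iff]
  exact (pvInnerA_iff xs i i).trans (pvRowChk_iff xs i).symm

theorem pvOuterA_eq_rowScan (xs : List String) (v : Bool) (ig : Int × Int × String)
    (l : List Nat) : pvOuterA xs v ig l = pvRowScan xs v ig l := by
  induction l with
  | nil => rfl
  | cons i rest ih => simp [pvOuterA, pvRowScan, pvInnerA_eq_rowChk, ih]

theorem pvTransp_length (group : List String) : (pvTransp group).length = pvMinW group := by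
  simp [pvTransp]

theorem pvTransp_getD (group : List String) (p : Nat) (h : p < pvMinW group) :
    (pvTransp group).getD p "" = pvColStr group (pvMinW group - 1 - p) := by
  unfold pvTransp
  have h' : p < (((List.range (pvMinW group)).map (fun q => pvColStr group q)).reverse).length := by
    simp [h]
  rw [List.getD_eq_getElem _ "" h', List.getElem_reverse, List.getElem_map, List.getElem_range]
  simp

theorem pvColStr_inj (group : List String) (q1 q2 : Nat) :
    pvColStr group q1 = pvColStr group q2 ↔
      ∀ row ∈ group, row.toList.getD q1 ' ' = row.toList.getD q2 ' ' := by
  unfold pvColStr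
  rw [String.ofList_inj, List.map_inj_left]

theorem pvMinW_le (group : List String) (row : String) (h : row ∈ group) :
    pvMinW group ≤ row.toList.length := by
  unfold pvMinW
  have hm : row.toList.length ∈ group.map (fun s => s.toList.length) := List.mem_map_of_mem h
  cases hmin : (group.map (fun s => s.toList.length)).min? with
  | none =>
    rw [List.min?_eq_none_iff] at hmin
    rw [hmin] at hm
    cases hm
  | some m =>
    rw [List.min?_eq_some_iff] at hmin
    exact hmin.2 _ hm

theorem pvSliceChk_iff (row : List Char) (w j : Nat) (hlen : w ≤ row.length)
    (hj : j + 1 < w) :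
    (((row.take (j+1)).drop (j+1 - min (j+1) (w-j-1))).reverse ==
        (row.drop (j+1)).take (min (j+1) (w-j-1))) = true ↔
      ∀ k < min (j+1) (w-j-1), row.getD (j-k) ' ' = row.getD (j+1+k) ' ' := by
  rw [beq_iff_eq]
  have hL : (((row.take (j+1)).drop (j+1 - min (j+1) (w-j-1))).reverse).length
      = min (j+1) (w-j-1) := by simp; omega
  have hR : ((row.drop (j+1)).take (min (j+1) (w-j-1))).length = min (j+1) (w-j-1) := by
    simp; omega
  constructor
  · intro H k hk
    have h1 : k < (((row.take (j+1)).drop (j+1 - min (j+1) (w-j-1))).reverse).length := by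
      omega
    have := congrArg (fun l => l.getD k ' ') H
    simp only at this
    rw [List.getD_eq_getElem _ ' ' h1, List.getD_eq_getElem _ ' ' (by omega : k < ((row.drop (j+1)).take (min (j+1) (w-j-1))).length)] at this
    rw [List.getElem_reverse, List.getElem_drop, List.getElem_take, List.getElem_take, List.getElem_drop] at this
    rw [List.getD_eq_getElem row ' ' (by omega : j - k < row.length),
        List.getD_eq_getElem row ' ' (by omega : j + 1 + k < row.length)]
    have e1 : j + 1 - min (j+1) (w-j-1) +
        (((row.take (j+1)).drop (j+1 - min (j+1) (w-j-1))).length - 1 - k) = j - k := by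
      simp; omega
    rwa [getElem_congr rfl e1 (by omega)] at this
  · intro H
    apply List.ext_getElem (by omega)
    intro k hk1 hk2
    rw [List.getElem_reverse, List.getElem_drop, List.getElem_take, List.getElem_take, List.getElem_drop]
    have hk : k < min (j+1) (w-j-1) := by omega
    have := H k hk
    rw [List.getD_eq_getElem row ' ' (by omega : j - k < row.length),
        List.getD_eq_getElem row ' ' (by omega : j + 1 + k < row.length)] at this
    have e1 : j + 1 - min (j+1) (w-j-1) +
        (((row.take (j+1)).drop (j+1 - min (j+1) (w-j-1))).length - 1 - k) = j - k := by
      simp; omega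
    rwa [getElem_congr rfl e1 (by omega)]

theorem pvColChk_iff (group : List String) (w j : Nat)
    (hw : ∀ row ∈ group, w ≤ row.toList.length) (hj : j + 1 < w) :
    pvColChk group w j = true ↔
      ∀ k < min (j+1) (w - j - 1), ∀ row ∈ group,
        row.toList.getD (j-k) ' ' = row.toList.getD (j+1+k) ' ' := by
  unfold pvColChk
  simp only [List.all_eq_true]
  constructor
  · intro H k hk row hrow
    exact (pvSliceChk_iff row.toList w j (hw row hrow) hj).mp (H row hrow) k hk
  · intro H row hrow
    exact (pvSliceChk_iff row.toList w j (hw row hrow) hj).mpr (fun k hk => H k hk row hrow)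

theorem pvInnerA_transp_eq_colChk (group : List String) (i : Nat)
    (h : i + 1 < pvMinW group) :
    pvInnerA (pvTransp group) i i = pvColChk group (pvMinW group) (pvMinW group - 2 - i) := by
  have hw : (pvTransp group).length = pvMinW group := pvTransp_length group
  rw [Bool.eq_iff_iff, pvInnerA_iff,
    pvColChk_iff group (pvMinW group) (pvMinW group - 2 - i)
      (fun row hrow => pvMinW_le group row hrow) (by omega)]
  constructor
  · intro H k hk row hrow
    have hk1 : i + 1 + k < (pvTransp group).length := by rw [hw]; omega
    have := H k hk1 (by omega)
    rw [pvTransp_getD _ _ (by omega), pvTransp_getD _ _ (by omega), pvColStr_inj] at this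
    have := this row hrow
    have e1 : pvMinW group - 1 - (i - k) = pvMinW group - 2 - i + 1 + k := by omega
    have e2 : pvMinW group - 1 - (i + 1 + k) = pvMinW group - 2 - i - k := by omega
    rw [e1, e2] at this
    exact this.symm
  · intro H k hk1 hki
    rw [hw] at hk1
    rw [pvTransp_getD _ _ (by omega), pvTransp_getD _ _ (by omega), pvColStr_inj]
    intro row hrow
    have := H k (by omega) row hrow
    have e1 : pvMinW group - 1 - (i - k) = pvMinW group - 2 - i + 1 + k := by omega
    have e2 : pvMinW group - 1 - (i + 1 + k) = pvMinW group - 2 - i - k := by omega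
    rw [e1, e2]
    exact this.symm

theorem pvVertScan (group : List String) (ig : Int × Int × String) (l : List Nat)
    (hl : ∀ i ∈ l, i + 1 < pvMinW group) :
    pvOuterA (pvTransp group) true ig l =
      pvColScan group (pvMinW group) ig (l.map (fun i => pvMinW group - 2 - i)) := by
  induction l with
  | nil => rfl
  | cons i rest ih =>
    have hi := hl i (List.mem_cons_self ..)
    have e1 : ((pvTransp group).length : Int) - i - 1 = ((pvMinW group - 2 - i : Nat) : Int) + 1 := by
      rw [pvTransp_length]; omega
    have e2 : ((pvTransp group).length : Int) - i = ((pvMinW group - 2 - i : Nat) : Int) + 2 := by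
      rw [pvTransp_length]; omega
    simp only [List.map_cons, pvOuterA, pvColScan, pvInnerA_transp_eq_colChk group i hi]
    rw [e1, e2]
    split_ifs <;> first
      | rfl
      | exact ih (fun j hj => hl j (List.mem_cons_of_mem _ hj))

theorem pvRangeRev (w : Nat) :
    (List.range (w - 1)).reverse = (List.range (w - 1)).map (fun i => w - 2 - i) := by
  apply List.ext_getElem
  · simp
  · intro n h1 h2
    simp only [List.getElem_reverse, List.getElem_map, List.getElem_range, List.length_range] at *
    omega

theorem pvMatchId (o : Option (Int × Int × String)) :
    (match o with | some r => some r | none => none) = o := by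
  cases o <;> rfl

theorem pvMain (group : List String) (v : Bool) (ig : Int × Int × String) :
    findReflectionRow group v ig = findReflectionRow_alt group v ig := by
  cases v with
  | true =>
    rw [findReflectionRow]
    unfold findReflectionRow_alt
    rw [pvOuterA_eq_rowScan]
    cases pvRowScan group true ig (List.range (group.length - 1)) <;> rfl
  | false =>
    rw [findReflectionRow]
    unfold findReflectionRow_alt
    rw [pvOuterA_eq_rowScan]
    cases pvRowScan group false ig (List.range (group.length - 1)) with
    | some r => rfl
    | none =>
      show findReflectionRow (pvTransp group) true ig = _
      rw [findReflectionRow]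
      simp only [reduceIte]
      rw [pvTransp_length,
        pvVertScan group ig (List.range (pvMinW group - 1))
          (by intro i hi; rw [List.mem_range] at hi; omega),
        ← pvRangeRev, pvMatchId, if_neg (by simp : ¬ false = true)]

-- ===== VERDICT (by name: the statement is the Claim_ definition above) =====
theorem findReflectionRow_spec : Claim_equal_findReflectionRow := by
  intro group vertical ignore _
  unfold Spec_findReflectionRow
  exact pvMain group vertical ignore
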